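-- pv_equiv track=rewrite | github.com/heejun32/Algorithm | 프로그래머스/lv1/92334. 신고 결과 받기/신고 결과 받기.py | solution
-- ===== SOURCE A (Python) =====
-- from collections import defaultdict
--
-- def solution(id_list, report, k):
--     answer = []
--
--     report_dict = defaultdict(set)
--     reported_dict = defaultdict(set)
--     for r in report:
--         user, reported_user = r.split()
--         report_dict[user].add(reported_user)
--         reported_dict[reported_user].add(user)
--
--     for user_id in id_list:
--         count = 0
--         for reported_user in report_dict[user_id]:
--             if len(reported_dict[reported_user]) >= k:
--                 count += 1
--         answer.append(count)
--
--     return answer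
-- ===== SOURCE B (Python) =====
-- from collections import Counter
--
-- def solution(id_list, report, k):
--     # one pass over the deduplicated report pairs with a precomputed banned set
--     pairs = {tuple(r.split()) for r in report}
--     cnt_reported = Counter(v for u, v in pairs)
--     banned = {v for v, c in cnt_reported.items() if c >= k}
--     cnt = Counter(u for u, v in pairs if v in banned)
--     return [cnt[u] for u in id_list]
-- ===== Notes on version B (the rewrite author's own statement) =====
-- stated objective: alternative
-- what changed: Replaces A's two per-user dicts of sets and nested per-id scan with a deduplicated set of report pairs, a Counter-derived banned set, and one pass over the pairs incrementing each reporter's count.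
import Mathlib
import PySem

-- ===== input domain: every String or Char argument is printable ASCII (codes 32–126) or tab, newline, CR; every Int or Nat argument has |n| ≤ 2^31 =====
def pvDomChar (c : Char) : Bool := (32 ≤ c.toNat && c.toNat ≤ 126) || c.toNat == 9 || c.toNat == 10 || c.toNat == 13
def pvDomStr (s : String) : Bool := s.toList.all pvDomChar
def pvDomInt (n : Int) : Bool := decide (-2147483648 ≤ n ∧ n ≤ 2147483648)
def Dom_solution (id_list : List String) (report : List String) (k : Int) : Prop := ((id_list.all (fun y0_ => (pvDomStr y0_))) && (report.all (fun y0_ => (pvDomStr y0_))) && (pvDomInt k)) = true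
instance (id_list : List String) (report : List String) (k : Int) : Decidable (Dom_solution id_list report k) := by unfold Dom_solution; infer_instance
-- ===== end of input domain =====

-- B replaces A's two per-user dicts of sets and nested per-id scan by a single pass over the
-- deduplicated report pairs with a precomputed banned set (alternative decomposition, similar cost).

-- shared step: 'user, reported = r.split()' (both Pythons perform it; none = ValueError, excluded by Pre_)
def pyPair? (r : String) : Option (String × String) :=
  match PySem.Str.split₀ r with
  | [u, v] => some (u, v)
  | _ => none

-- ===== PORT A =====
def buildDicts (report : List String)
    (st : PySem.Dict String (PySem.Set String) × PySem.Dict String (PySem.Set String)) :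
    PySem.Dict String (PySem.Set String) × PySem.Dict String (PySem.Set String) :=
  report.foldl (fun st r =>
    match pyPair? r with
    | some (user, reported) =>
        (st.1.insert user (PySem.Set.add (st.1.getD user PySem.Set.empty) reported),
         st.2.insert reported (PySem.Set.add (st.2.getD reported PySem.Set.empty) user))
    | none => st) st

-- Python iterates report_dict[user_id] (a set) in hash order; the count below is order-independent.
def solution (id_list : List String) (report : List String) (k : Int) : List Int :=
  let dicts := buildDicts report (PySem.Dict.empty, PySem.Dict.empty)
  id_list.map (fun user_id =>
    (dicts.1.getD user_id PySem.Set.empty).foldl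
      (fun count reported_user =>
        if k ≤ (((dicts.2.getD reported_user PySem.Set.empty).length : Int)) then count + 1
        else count) 0)

-- ===== PORT B =====
-- counters/membership built from set iterations are order-independent.
def solution_alt (id_list : List String) (report : List String) (k : Int) : List Int :=
  let pairs : PySem.Set (String × String) := PySem.Set.ofList (report.filterMap pyPair?)
  let cntReported : PySem.Dict String Int := PySem.Dict.counter (pairs.map Prod.snd)
  let banned : PySem.Set String :=
    PySem.Set.ofList ((cntReported.items.filter (fun vc => k ≤ vc.2)).map Prod.fst)
  let cnt : PySem.Dict String Int :=
    PySem.Dict.counter ((pairs.filter (fun p => banned.contains p.2)).map Prod.fst)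
  id_list.map (fun u => cnt.getD u 0)

-- ===== PRECONDITION & SPEC =====
-- Pre_ excludes reports that do not split into exactly two whitespace-separated tokens:
-- there Python A raises ValueError at 'user, reported_user = r.split()'.
def Pre_solution (id_list : List String) (report : List String) (k : Int) : Prop :=
  ∀ r ∈ report, (PySem.Str.split₀ r).length = 2
instance (id_list : List String) (report : List String) (k : Int) : Decidable (Pre_solution id_list report k) := by unfold Pre_solution; infer_instance
def pvWitness_solution : List String × List String × Int :=
  (["muzi", "frodo", "apeach"], ["muzi frodo", "apeach frodo", "muzi frodo"], 2)
def Spec_solution (id_list : List String) (report : List String) (k : Int) (out : List Int) : Prop := out = solution_alt id_list report k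
instance (id_list : List String) (report : List String) (k : Int) (out : List Int) : Decidable (Spec_solution id_list report k out) := by unfold Spec_solution; infer_instance

-- ===== CLAIM (what is proved, stated in full; the proofs are below) =====
def Claim_equal_solution : Prop := ∀ (id_list : List String) (report : List String) (k : Int), Dom_solution id_list report k → Pre_solution id_list report k → Spec_solution id_list report k (solution id_list report k)

-- ===== LEMMAS AND PROOFS =====

def pvPairs (report : List String) : List (String × String) := report.filterMap pyPair?

def pvSA (report : List String) (u : String) : PySem.Set String :=
  PySem.Set.ofList (((pvPairs report).filter (fun p => p.1 == u)).map Prod.snd)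

def pvTA (report : List String) (v : String) : PySem.Set String :=
  PySem.Set.ofList (((pvPairs report).filter (fun p => p.2 == v)).map Prod.fst)

lemma buildDicts_fst (report : List String) (st : PySem.Dict String (PySem.Set String) × PySem.Dict String (PySem.Set String)) (u : String) :
    (buildDicts report st).1.getD u PySem.Set.empty
      = (st.1.getD u PySem.Set.empty).update
          (((pvPairs report).filter (fun p => p.1 == u)).map Prod.snd) := by
  induction report generalizing st with
  | nil => simp [buildDicts, pvPairs, PySem.Set.update_nil]
  | cons r rs ih =>
    simp only [buildDicts, List.foldl_cons, pvPairs, List.filterMap_cons]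
    cases h : pyPair? r with
    | none => simpa [buildDicts, pvPairs] using ih _
    | some p =>
      obtain ⟨u0, v0⟩ := p
      simp only [h]
      rw [show (List.foldl _ _ rs) = buildDicts rs _ from rfl, ih]
      by_cases hu : u = u0
      · subst hu
        simp [PySem.Set.update_cons, pvPairs]
      · simp [PySem.Dict.getD_insert, hu, beq_iff_eq, Ne.symm hu, pvPairs]

lemma buildDicts_snd (report : List String) (st : PySem.Dict String (PySem.Set String) × PySem.Dict String (PySem.Set String)) (v : String) :
    (buildDicts report st).2.getD v PySem.Set.empty
      = (st.2.getD v PySem.Set.empty).update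
          (((pvPairs report).filter (fun p => p.2 == v)).map Prod.fst) := by
  induction report generalizing st with
  | nil => simp [buildDicts, pvPairs, PySem.Set.update_nil]
  | cons r rs ih =>
    simp only [buildDicts, List.foldl_cons, pvPairs, List.filterMap_cons]
    cases h : pyPair? r with
    | none => simpa [buildDicts, pvPairs] using ih _
    | some p =>
      obtain ⟨u0, v0⟩ := p
      simp only [h]
      rw [show (List.foldl _ _ rs) = buildDicts rs _ from rfl, ih]
      by_cases hv : v = v0
      · subst hv
        simp [PySem.Set.update_cons, pvPairs]
      · simp [PySem.Dict.getD_insert, hv, beq_iff_eq, Ne.symm hv, pvPairs]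

lemma dicts_fst_eq (report : List String) (u : String) :
    (buildDicts report (PySem.Dict.empty, PySem.Dict.empty)).1.getD u PySem.Set.empty = pvSA report u := by
  rw [buildDicts_fst]
  simp only [pvSA, PySem.Dict.getD_empty]
  exact PySem.Set.update_empty _

lemma dicts_snd_eq (report : List String) (v : String) :
    (buildDicts report (PySem.Dict.empty, PySem.Dict.empty)).2.getD v PySem.Set.empty = pvTA report v := by
  rw [buildDicts_snd]
  simp only [pvTA, PySem.Dict.getD_empty]
  exact PySem.Set.update_empty _

lemma length_eq_of_nodup_mem {α : Type} {l1 l2 : List α} (h1 : l1.Nodup) (h2 : l2.Nodup)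
    (h : ∀ x, x ∈ l1 ↔ x ∈ l2) : l1.length = l2.length :=
  ((List.perm_ext_iff_of_nodup h1 h2).mpr h).length_eq

-- Q abbreviates the deduplicated pair set of B
def pvQ (report : List String) : PySem.Set (String × String) := PySem.Set.ofList (pvPairs report)

lemma mem_pvQ (report : List String) (p : String × String) : p ∈ pvQ report ↔ p ∈ pvPairs report :=
  PySem.Set.mem_ofList _ _

lemma mem_pvSA (report : List String) (u w : String) :
    w ∈ pvSA report u ↔ (u, w) ∈ pvPairs report := by
  simp only [pvSA, PySem.Set.mem_ofList, List.mem_map, List.mem_filter, beq_iff_eq]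
  constructor
  · rintro ⟨⟨a, b⟩, ⟨hp, h1⟩, h2⟩
    simp only at h1 h2
    subst h1; subst h2; exact hp
  · intro h; exact ⟨(u, w), ⟨h, rfl⟩, rfl⟩

lemma lenTA_eq_count (report : List String) (v : String) :
    (pvTA report v).length = List.count v ((pvQ report).map Prod.snd) := by
  rw [List.count_eq_countP, List.countP_map, List.countP_eq_length_filter]
  have hQ : (pvQ report).Nodup := PySem.Set.nodup_ofList _
  have key := length_eq_of_nodup_mem
      (l1 := pvTA report v)
      (l2 := List.map Prod.fst (List.filter (fun p => ((fun x => x == v) ∘ Prod.snd) p) (pvQ report)))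
      (PySem.Set.nodup_ofList _)
      ((hQ.filter _).map_on ?_) ?_
  · rw [key, List.length_map]
  · intro x hx y hy hxy
    have hx2 := (List.mem_filter.mp hx).2
    have hy2 := (List.mem_filter.mp hy).2
    simp only [Function.comp, beq_iff_eq] at hx2 hy2
    exact Prod.ext hxy (hx2.trans hy2.symm)
  · intro w
    simp only [pvTA, pvQ, PySem.Set.mem_ofList, List.mem_map, List.mem_filter, Function.comp,
      beq_iff_eq]

lemma banned_iff (report : List String) (k : Int) (v : String) (hv : v ∈ (pvQ report).map Prod.snd) :
    (PySem.Set.ofList (((PySem.Dict.counter ((pvQ report).map Prod.snd)).items.filter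
        (fun vc => k ≤ vc.2)).map Prod.fst)).contains v
      = decide (k ≤ ((pvTA report v).length : Int)) := by
  rw [Bool.eq_iff_iff, PySem.Set.contains_iff, decide_eq_true_iff, lenTA_eq_count]
  simp only [PySem.Set.mem_ofList, PySem.Dict.items_counter, List.mem_map, List.mem_filter]
  constructor
  · rintro ⟨x, ⟨⟨y, hy, rfl⟩, hk⟩, rfl⟩
    simpa using hk
  · intro hk
    obtain ⟨p, hp, hpv⟩ := List.mem_map.mp hv
    exact ⟨(v, (List.count v ((pvQ report).map Prod.snd) : Int)),
      ⟨⟨v, ⟨p, hp, hpv⟩, rfl⟩, by simpa using hk⟩, rfl⟩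

lemma entry_eq (report : List String) (k : Int) (u : String) :
    ((List.countP (fun v => decide (k ≤ ((pvTA report v).length : Int))) (pvSA report u) : Int))
      = ((List.countP (fun p => (p.1 == u) &&
            (PySem.Set.ofList (((PySem.Dict.counter ((pvQ report).map Prod.snd)).items.filter
              (fun vc => k ≤ vc.2)).map Prod.fst)).contains p.2) (pvQ report) : Int)) := by
  have hQ : (pvQ report).Nodup := PySem.Set.nodup_ofList _
  have hSA : (pvSA report u).Nodup := PySem.Set.nodup_ofList _
  norm_cast
  rw [List.countP_eq_length_filter, List.countP_eq_length_filter]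
  have key := length_eq_of_nodup_mem
      (l1 := List.map (fun v => (u, v))
        (List.filter (fun v => decide (k ≤ ((pvTA report v).length : Int))) (pvSA report u)))
      (l2 := List.filter (fun p => (p.1 == u) &&
            (PySem.Set.ofList (((PySem.Dict.counter ((pvQ report).map Prod.snd)).items.filter
              (fun vc => k ≤ vc.2)).map Prod.fst)).contains p.2) (pvQ report))
      ((hSA.filter _).map_on ?_) (hQ.filter _) ?_
  · rw [← key, List.length_map]
  · intro x _ y _ h
    simpa using h
  · intro p
    simp only [List.mem_map, List.mem_filter]
    constructor
    · rintro ⟨v, ⟨hvSA, hpr⟩, rfl⟩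
      have hpP : (u, v) ∈ pvPairs report := (mem_pvSA report u v).mp hvSA
      have hpQ : (u, v) ∈ pvQ report := (mem_pvQ report _).mpr hpP
      have hv2 : v ∈ (pvQ report).map Prod.snd := List.mem_map.mpr ⟨(u, v), hpQ, rfl⟩
      refine ⟨hpQ, ?_⟩
      simp only [beq_self_eq_true, Bool.true_and]
      rw [banned_iff report k v hv2]
      exact hpr
    · rintro ⟨hpQ, hcond⟩
      simp only [Bool.and_eq_true] at hcond
      obtain ⟨h1, h2⟩ := hcond
      have hu : p.1 = u := beq_iff_eq.mp h1
      have hv2 : p.2 ∈ (pvQ report).map Prod.snd := List.mem_map.mpr ⟨p, hpQ, rfl⟩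
      refine ⟨p.2, ⟨?_, ?_⟩, ?_⟩
      · exact (mem_pvSA report u p.2).mpr (by
          have : (p.1, p.2) ∈ pvPairs report := by
            simpa using (mem_pvQ report p).mp hpQ
          rwa [hu] at this)
      · rw [← banned_iff report k p.2 hv2]
        exact h2
      · rw [← hu]

-- ===== VERDICT (by name: the statement is the Claim_ definition above) =====
theorem solution_spec : Claim_equal_solution := by
  intro id_list report k _hdom _hpre
  unfold Spec_solution solution solution_alt
  simp only [dicts_fst_eq, dicts_snd_eq]
  apply List.map_congr_left
  intro u _
  rw [PySem.List.foldl_ite_add_one (fun v => k ≤ ((pvTA report v).length : Int))]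
  rw [PySem.Dict.getD_counter, List.count_eq_countP, List.countP_map, List.countP_filter]
  rw [entry_eq report k u]
  simp [Function.comp, pvQ, pvPairs]
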